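-- pv_equiv track=rewrite | github.com/BastiTee/pype-cli | pype/util/multi_cmd.py | __remove_common_postfix_from_string_list
-- ===== SOURCE A (Python) =====
-- from typing import Any, Callable, List
--
-- def __remove_common_postfix_from_string_list(
--         string_list: List[str]) -> List[str]:
--     """If a list of strings share the same postfix they will be removed."""
--     if any([len(string) < 2 or not string for string in string_list]):
--         return string_list
--     uniq_last_char = len(set([string[-1:] for string in string_list]))
--     if uniq_last_char == 1:
--         string_list = __remove_common_postfix_from_string_list(
--             [string[:-1] for string in string_list])
--     return string_list
-- ===== SOURCE B (Python) =====
-- def __remove_common_postfix_from_string_list(string_list):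
--     """If a list of strings share the same postfix they will be removed."""
--     if not string_list:
--         return string_list
--     m = min(len(s) for s in string_list)
--     if m < 2:
--         return string_list
--     first = string_list[0]
--     c = 0
--     while c < m and all(s[len(s) - 1 - c] == first[len(first) - 1 - c]
--                         for s in string_list):
--         c += 1
--     k = min(c, m - 1)
--     return [s[:len(s) - k] for s in string_list]
-- ===== Notes on version B (the rewrite author's own statement) =====
-- stated objective: alternative
-- what changed: A recursively rebuilds the whole list (set of last characters, then re-slices every string) once per shared suffix character; B computes the removable common-suffix length with a single counting loop and then slices each string exactly once, with no recursion and no intermediate lists.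
import Mathlib
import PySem

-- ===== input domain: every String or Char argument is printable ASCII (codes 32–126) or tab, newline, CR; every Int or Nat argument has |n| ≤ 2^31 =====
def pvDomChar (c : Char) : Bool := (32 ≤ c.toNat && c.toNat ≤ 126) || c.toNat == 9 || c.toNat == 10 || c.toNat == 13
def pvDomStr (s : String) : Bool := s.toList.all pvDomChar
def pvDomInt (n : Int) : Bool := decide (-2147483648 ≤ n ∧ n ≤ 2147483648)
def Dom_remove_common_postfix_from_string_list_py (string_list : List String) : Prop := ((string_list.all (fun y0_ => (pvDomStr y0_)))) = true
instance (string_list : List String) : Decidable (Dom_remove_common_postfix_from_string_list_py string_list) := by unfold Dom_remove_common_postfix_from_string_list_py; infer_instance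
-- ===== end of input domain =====

-- ===== PORT A =====
-- B computes the removable common-suffix length in one scan and slices each string once, instead of A's repeated last-char-set + reslice rounds.

-- termination helper for port A (cited by its decreasing_by)
theorem pvMeasureDec (l : List String) (hne : l ≠ [])
    (h2 : ∀ s ∈ l, ¬(PySem.Str.len s < 2 ∨ s = "")) :
    ((l.map (fun s => PySem.Str.slice s none (some (-1)))).map (fun s => s.toList.length)).sum
      < (l.map (fun s => s.toList.length)).sum := by
  have aux : ∀ t : List String,
      ((t.map (fun s => PySem.Str.slice s none (some (-1)))).map (fun s => s.toList.length)).sum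
        ≤ (t.map (fun s => s.toList.length)).sum := by
    intro t
    induction t with
    | nil => simp
    | cons x u ih =>
      simp only [List.map_cons, List.sum_cons]
      have hx : (PySem.Str.slice x none (some (-1))).toList.length ≤ x.toList.length := by
        rw [PySem.Str.slice_to_neg_one, List.length_dropLast]
        omega
      omega
  rcases l with _ | ⟨x, t⟩
  · exact absurd rfl hne
  · simp only [List.map_cons, List.sum_cons]
    have hx2 : 2 ≤ PySem.Str.len x := by
      have := h2 x (by simp)
      push Not at this
      omega
    have hxl : 2 ≤ x.toList.length := by
      have : PySem.Str.len x = (x.toList.length : Int) := by simp [pysem]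
      omega
    have hx : (PySem.Str.slice x none (some (-1))).toList.length < x.toList.length := by
      rw [PySem.Str.slice_to_neg_one, List.length_dropLast]
      omega
    have := aux t
    omega

def remove_common_postfix_from_string_list_py (string_list : List String) : List String :=
  if string_list.any (fun s => decide (PySem.Str.len s < 2) || decide (s = "")) then
    string_list
  else if PySem.Set.len (PySem.Set.ofList
      (string_list.map (fun s => PySem.Str.slice s (some (-1)) none))) = 1 then
    remove_common_postfix_from_string_list_py
      (string_list.map (fun s => PySem.Str.slice s none (some (-1))))
  else
    string_list
termination_by (string_list.map (fun s => s.toList.length)).sum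
decreasing_by
  rename_i hany hset
  have hat : (List.map (fun (x : Subtype (Membership.mem string_list)) => PySem.Str.slice (↑x) none (some (-1))) string_list.attach)
      = string_list.map (fun s => PySem.Str.slice s none (some (-1))) := by
    simp
  rw [hat]
  refine pvMeasureDec string_list ?_ ?_
  · intro h
    subst h
    simp [PySem.Set.len, PySem.Set.ofList] at hset
  · intro s hs hbad
    have hc : (decide (PySem.Str.len s < 2) || decide (s = "")) = true := by
      rcases hbad with hb | hb
      · rw [decide_eq_true hb]; rfl
      · rw [decide_eq_true hb, Bool.or_true]
    exact hany (List.any_eq_true.mpr ⟨s, hs, hc⟩)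

-- ===== PORT B =====
-- while-loop of Source B: grow c while all strings agree at position len-1-c, c < m
def pvCslLoop (string_list : List String) (first : String) (m : Int) (c : Int) : Int :=
  if c < m then
    if string_list.all (fun s =>
        PySem.List.pyGet? s.toList (PySem.Str.len s - 1 - c) ==
        PySem.List.pyGet? first.toList (PySem.Str.len first - 1 - c)) then
      pvCslLoop string_list first m (c + 1)
    else c
  else c
termination_by (m - c).toNat
decreasing_by rename_i h _; omega

def remove_common_postfix_from_string_list_py_alt (string_list : List String) : List String :=
  if string_list = [] then string_list
  else
    let m := (PySem.List.min? (string_list.map PySem.Str.len) (fun x => x)).getD 0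
    if m < 2 then string_list
    else
      let first := string_list.headD ""
      let c := pvCslLoop string_list first m 0
      let k := min c (m - 1)
      string_list.map (fun s => PySem.Str.slice s none (some (PySem.Str.len s - k)))

-- ===== PRECONDITION & SPEC =====
def Spec_remove_common_postfix_from_string_list_py (string_list : List String) (out : List String) : Prop := out = remove_common_postfix_from_string_list_py_alt string_list
instance (string_list : List String) (out : List String) : Decidable (Spec_remove_common_postfix_from_string_list_py string_list out) := by unfold Spec_remove_common_postfix_from_string_list_py; infer_instance

-- ===== CLAIM (what is proved, stated in full; the proofs are below) =====
def Claim_equal_remove_common_postfix_from_string_list_py : Prop := ∀ (string_list : List String), Dom_remove_common_postfix_from_string_list_py string_list → Spec_remove_common_postfix_from_string_list_py string_list (remove_common_postfix_from_string_list_py string_list)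

-- ===== LEMMAS AND PROOFS =====

-- ---- small bridges ----
theorem pv_len_eq (s : String) : PySem.Str.len s = (s.toList.length : Int) := by
  simp [pysem]

theorem pv_setlen_one {xs : List String} (h : PySem.Set.len (PySem.Set.ofList xs) = 1) :
    xs ≠ [] ∧ ∀ y ∈ xs, y = xs.headD "" := by
  have hlen : (PySem.Set.ofList xs).length = 1 := by
    simpa [PySem.Set.len, PySem.List.len] using h
  obtain ⟨a, ha⟩ := List.length_eq_one_iff.mp hlen
  have hmem : ∀ y ∈ xs, y = a := by
    intro y hy
    have : y ∈ PySem.Set.ofList xs := (PySem.Set.mem_ofList xs y).mpr hy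
    rw [ha] at this
    simpa using this
  have hne : xs ≠ [] := by
    intro h0
    subst h0
    simp [PySem.Set.ofList] at ha
  rcases xs with _ | ⟨x, t⟩
  · exact absurd rfl hne
  · refine ⟨hne, ?_⟩
    intro y hy
    have := hmem y hy
    have hx := hmem x (by simp)
    simp [this, hx]

theorem pv_setlen_one_of {xs : List String} (hne : xs ≠ []) (h : ∀ y ∈ xs, y = xs.headD "") :
    PySem.Set.len (PySem.Set.ofList xs) = 1 := by
  rcases xs with _ | ⟨x, t⟩
  · exact absurd rfl hne
  · have : PySem.Set.ofList (x :: t) = [x] := by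
      rw [PySem.Set.ofList_cons]
      have ht : PySem.Set.ofList t = [] ∨ PySem.Set.ofList t = [x] := by
        have hsub : ∀ y ∈ PySem.Set.ofList t, y = x := by
          intro y hy
          have := (PySem.Set.mem_ofList t y).mp hy
          simpa using h y (by simp [this])
        rcases hS : PySem.Set.ofList t with _ | ⟨b, u⟩
        · exact Or.inl rfl
        · right
          have hnd := PySem.Set.nodup_ofList t
          rw [hS] at hnd
          have hb : b = x := hsub b (by rw [hS]; simp)
          have hu : u = [] := by
            rcases u with _ | ⟨c, v⟩
            · rfl
            · have hc : c = x := hsub c (by rw [hS]; simp)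
              simp [hb, hc] at hnd
          simp [hb, hu]
      rcases ht with h1 | h1 <;> simp [h1, PySem.Set.discard]
    simp [PySem.Set.len, this]

theorem pv_loop_ge (l : List String) (f : String) (m c : Int) : c ≤ pvCslLoop l f m c := by
  fun_induction pvCslLoop l f m c with
  | case1 c h hall ih => omega
  | case2 c h hall => omega
  | case3 c h => omega

def pvMinFold (acc : Option Int) (xs : List Int) : Option Int :=
  xs.foldl (fun a x => match a with | none => some x | some m => if x < m then some x else some m) acc

theorem pv_min_eq_fold (xs : List Int) : PySem.List.min? xs (fun x => x) = pvMinFold none xs := by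
  unfold PySem.List.min? pvMinFold
  congr 1
  funext a x
  rcases a with _ | m <;> rfl

theorem pv_minFold_some (xs : List Int) (a : Int) : ∃ m, pvMinFold (some a) xs = some m := by
  induction xs generalizing a with
  | nil => exact ⟨a, rfl⟩
  | cons b u ih =>
    simp only [pvMinFold, List.foldl_cons]
    split <;> exact ih _

theorem pv_min_some (xs : List Int) (h : xs ≠ []) :
    ∃ m, PySem.List.min? xs (fun x => x) = some m := by
  rcases xs with _ | ⟨a, t⟩
  · exact absurd rfl h
  · rw [pv_min_eq_fold]
    simpa [pvMinFold] using pv_minFold_some t a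

theorem pv_minFold_shift (xs : List Int) (acc : Option Int) :
    pvMinFold (acc.map (· - 1)) (xs.map (· - 1)) = (pvMinFold acc xs).map (· - 1) := by
  induction xs generalizing acc with
  | nil => rfl
  | cons a t ih =>
    rcases acc with _ | m
    · simpa [pvMinFold] using ih (some a)
    · simp only [pvMinFold, List.map_cons, List.foldl_cons, Option.map_some]
      by_cases h : a < m
      · rw [if_pos (by omega : a - 1 < m - 1), if_pos h]
        exact ih (some a)
      · rw [if_neg (by omega : ¬ a - 1 < m - 1), if_neg h]
        exact ih (some m)

theorem pv_min_shift (xs : List Int) :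
    PySem.List.min? (xs.map (· - 1)) (fun x => x) =
      (PySem.List.min? xs (fun x => x)).map (· - 1) := by
  rw [pv_min_eq_fold, pv_min_eq_fold]
  simpa using pv_minFold_shift xs none

theorem pv_all_congr {α : Type} (l : List α) (f g : α → Bool) (h : ∀ x ∈ l, f x = g x) :
    l.all f = l.all g := by
  induction l with
  | nil => rfl
  | cons a t ih =>
    simp only [List.all_cons, h a (by simp), ih (fun x hx => h x (by simp [hx]))]

theorem pv_len_init (s : String) (h : 1 ≤ s.toList.length) :
    PySem.Str.len (PySem.Str.slice s none (some (-1))) = PySem.Str.len s - 1 := by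
  rw [pv_len_eq, pv_len_eq, PySem.Str.slice_to_neg_one, List.length_dropLast]
  omega

theorem pv_take_eq (s : String) (b : Int) (h : 0 ≤ b) :
    (PySem.Str.slice s none (some b)).toList = s.toList.take b.toNat := by
  rw [PySem.Str.toList_slice, PySem.Chars.slice_eq_listSlice]
  exact PySem.List.slice_to s.toList h

theorem pv_get_dropLast (xs : List Char) (i : Int) (h0 : 0 ≤ i) (h1 : i < (xs.length : Int) - 1) :
    PySem.List.pyGet? xs.dropLast i = PySem.List.pyGet? xs i := by
  have hi : i = ((i.toNat : Nat) : Int) := by omega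
  rw [hi, PySem.List.pyGet?_natCast, PySem.List.pyGet?_natCast]
  rw [List.getElem?_dropLast, if_pos (by omega)]

theorem pv_cond_step (l : List String) (f : String) (j : Int)
    (h2 : ∀ s ∈ l, 2 ≤ (s.toList.length : Int))
    (hjs : ∀ s ∈ l, j < (s.toList.length : Int) - 1)
    (hf2 : 2 ≤ (f.toList.length : Int))
    (hjf : j < (f.toList.length : Int) - 1)
    (hj : 0 ≤ j) :
    ((l.map (fun s => PySem.Str.slice s none (some (-1)))).all (fun s =>
        PySem.List.pyGet? s.toList (PySem.Str.len s - 1 - j) ==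
        PySem.List.pyGet? (PySem.Str.slice f none (some (-1))).toList
          (PySem.Str.len (PySem.Str.slice f none (some (-1))) - 1 - j)))
    = (l.all (fun s =>
        PySem.List.pyGet? s.toList (PySem.Str.len s - 1 - (j + 1)) ==
        PySem.List.pyGet? f.toList (PySem.Str.len f - 1 - (j + 1)))) := by
  rw [List.all_map]
  refine pv_all_congr l _ _ ?_
  intro s hs
  simp only [Function.comp]
  rw [pv_len_init s (by have := h2 s hs; omega), PySem.Str.slice_to_neg_one,
    pv_len_init f (by omega), PySem.Str.slice_to_neg_one]
  rw [show PySem.Str.len s - 1 - 1 - j = PySem.Str.len s - 1 - (j + 1) by ring,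
    show PySem.Str.len f - 1 - 1 - j = PySem.Str.len f - 1 - (j + 1) by ring]
  rw [pv_get_dropLast s.toList _ (by rw [pv_len_eq]; have := hjs s hs; omega)
        (by rw [pv_len_eq]; have := hjs s hs; omega),
      pv_get_dropLast f.toList _ (by rw [pv_len_eq]; omega) (by rw [pv_len_eq]; omega)]

theorem pv_loop_step (l : List String) (f : String) (m j : Int)
    (h2 : ∀ s ∈ l, 2 ≤ (s.toList.length : Int))
    (hm : ∀ s ∈ l, m ≤ (s.toList.length : Int))
    (hf2 : 2 ≤ (f.toList.length : Int))
    (hmf : m ≤ (f.toList.length : Int))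
    (hj : 0 ≤ j) :
    pvCslLoop (l.map (fun s => PySem.Str.slice s none (some (-1))))
        (PySem.Str.slice f none (some (-1))) (m - 1) j + 1
      = pvCslLoop l f m (j + 1) := by
  by_cases hg : j < m - 1
  · conv_lhs => rw [pvCslLoop]
    conv_rhs => rw [pvCslLoop]
    rw [if_pos hg, if_pos (show j + 1 < m by omega)]
    rw [pv_cond_step l f j h2 (fun s hs => by have := hm s hs; omega) hf2 (by omega) hj]
    by_cases hc : (l.all (fun s =>
        PySem.List.pyGet? s.toList (PySem.Str.len s - 1 - (j + 1)) ==
        PySem.List.pyGet? f.toList (PySem.Str.len f - 1 - (j + 1)))) = true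
    · rw [if_pos hc, if_pos hc]
      exact pv_loop_step l f m (j + 1) h2 hm hf2 hmf (by omega)
    · rw [if_neg hc, if_neg hc]
  · conv_lhs => rw [pvCslLoop]
    conv_rhs => rw [pvCslLoop]
    rw [if_neg hg, if_neg (show ¬ j + 1 < m by omega)]
termination_by (m - j).toNat
decreasing_by omega

theorem pv_last' (xs : List Char) (h : xs ≠ []) :
    PySem.List.pyGet? xs ((xs.length : Int) - 1) = xs.getLast? := by
  have hpos : 0 < xs.length := List.length_pos_iff.mpr h
  have h1 : ((xs.length : Int) - 1) = ((xs.length - 1 : Nat) : Int) := by omega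
  rw [h1, PySem.List.pyGet?_natCast, ← List.getLast?_eq_getElem?]

theorem pv_gl_toList (s : String) (h : s.toList ≠ []) :
    (PySem.Str.slice s (some (-1)) none).toList = [s.toList.getLast h] := by
  rw [PySem.Str.toList_slice, PySem.Chars.slice_eq_listSlice, PySem.List.slice_from_neg_one,
    List.drop_length_sub_one h]

theorem pv_gl_eq (s t : String) (hs : s.toList ≠ []) (ht : t.toList ≠ [])
    (h : s.toList.getLast? = t.toList.getLast?) :
    PySem.Str.slice s (some (-1)) none = PySem.Str.slice t (some (-1)) none := by
  apply String.toList_inj.mp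
  rw [pv_gl_toList s hs, pv_gl_toList t ht]
  rw [List.getLast?_eq_some_getLast hs, List.getLast?_eq_some_getLast ht] at h
  simpa using h

theorem pv_last_of_gl (s t : String) (hs : s.toList ≠ []) (ht : t.toList ≠ [])
    (h : PySem.Str.slice s (some (-1)) none = PySem.Str.slice t (some (-1)) none) :
    s.toList.getLast? = t.toList.getLast? := by
  have h2 := congrArg String.toList h
  rw [pv_gl_toList s hs, pv_gl_toList t ht] at h2
  rw [List.getLast?_eq_some_getLast hs, List.getLast?_eq_some_getLast ht]
  simpa using h2

-- the stage-0 agreement check of pvCslLoop, from equal last characters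
theorem pv_P0 (l : List String) (first : String)
    (h2 : ∀ s ∈ l, 2 ≤ (s.toList.length : Int))
    (hf2 : 2 ≤ (first.toList.length : Int))
    (hlast : ∀ s ∈ l, s.toList.getLast? = first.toList.getLast?) :
    (l.all (fun s =>
        PySem.List.pyGet? s.toList (PySem.Str.len s - 1 - 0) ==
        PySem.List.pyGet? first.toList (PySem.Str.len first - 1 - 0))) = true := by
  refine List.all_eq_true.mpr ?_
  intro s hs
  have hsne : s.toList ≠ [] := by
    intro h0; have := h2 s hs; rw [h0] at this; simp at this
  have hfne : first.toList ≠ [] := by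
    intro h0; rw [h0] at hf2; simp at hf2
  rw [show PySem.Str.len s - 1 - 0 = (s.toList.length : Int) - 1 by rw [pv_len_eq]; ring,
    show PySem.Str.len first - 1 - 0 = (first.toList.length : Int) - 1 by rw [pv_len_eq]; ring,
    pv_last' s.toList hsne, pv_last' first.toList hfne, hlast s hs]
  exact beq_self_eq_true _

theorem pv_alt_step (l : List String) (hne : l ≠ [])
    (h2 : ∀ s ∈ l, 2 ≤ (s.toList.length : Int))
    (hlast : ∀ s ∈ l, s.toList.getLast? = (l.headD "").toList.getLast?) :
    remove_common_postfix_from_string_list_py_alt l =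
      remove_common_postfix_from_string_list_py_alt
        (l.map (fun s => PySem.Str.slice s none (some (-1)))) := by
  -- notation
  set g' : String → String := fun s => PySem.Str.slice s none (some (-1)) with hg'
  have hfirst_mem : l.headD "" ∈ l := by
    rcases l with _ | ⟨x, t⟩
    · exact absurd rfl hne
    · simp
  have hf2 := h2 _ hfirst_mem
  -- min of lengths
  obtain ⟨m0, hm0⟩ := pv_min_some (l.map PySem.Str.len) (by simpa using hne)
  have hmin : ∀ s ∈ l, m0 ≤ PySem.Str.len s := by
    intro s hs
    exact PySem.List.min?_isMin hm0 _ (List.mem_map_of_mem hs)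
  obtain ⟨t0, ht0, ht0e⟩ := List.mem_map.mp (PySem.List.min?_mem hm0)
  have hm2 : 2 ≤ m0 := by
    rw [← ht0e]; rw [pv_len_eq]; exact h2 t0 ht0
  have hminL : ∀ s ∈ l, m0 ≤ (s.toList.length : Int) := by
    intro s hs; have := hmin s hs; rwa [pv_len_eq] at this
  -- the primed list
  have hne' : l.map g' ≠ [] := by simpa using hne
  have hlen' : (l.map g').map PySem.Str.len = (l.map PySem.Str.len).map (· - 1) := by
    rw [List.map_map, List.map_map]
    refine List.map_congr_left ?_
    intro s hs
    simp only [Function.comp, hg']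
    rw [pv_len_init s (by have := h2 s hs; omega)]
  have hm0' : PySem.List.min? ((l.map g').map PySem.Str.len) (fun x => x) = some (m0 - 1) := by
    rw [hlen', pv_min_shift, hm0]; rfl
  have hhead' : (l.map g').headD "" = g' (l.headD "") := by
    rcases l with _ | ⟨x, t⟩
    · exact absurd rfl hne
    · simp
  -- stage-0 agreement and the loop relation
  have hP0 := pv_P0 l (l.headD "") h2 hf2 hlast
  have hc1 : pvCslLoop l (l.headD "") m0 0 = pvCslLoop l (l.headD "") m0 1 := by
    conv_lhs => rw [pvCslLoop]
    rw [if_pos (by omega : (0:Int) < m0), hP0]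
    simp
  -- unfold alt l
  unfold remove_common_postfix_from_string_list_py_alt
  rw [if_neg hne, if_neg hne']
  simp only [hm0, hm0', Option.getD_some]
  rw [if_neg (by omega : ¬ m0 < 2)]
  by_cases hm3 : m0 < 3
  · -- m0 = 2 : the primed call returns its argument
    rw [if_pos (by omega : m0 - 1 < 2)]
    have hcge : 1 ≤ pvCslLoop l (l.headD "") m0 0 := by
      rw [hc1]; exact pv_loop_ge l (l.headD "") m0 1
    have hk : min (pvCslLoop l (l.headD "") m0 0) (m0 - 1) = 1 := by omega
    rw [hk]
    refine List.map_congr_left ?_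
    intro s hs
    apply String.toList_inj.mp
    rw [pv_take_eq s _ (by rw [pv_len_eq]; have := h2 s hs; omega), hg']
    rw [PySem.Str.slice_to_neg_one, List.dropLast_eq_take]
    congr 1
    rw [pv_len_eq]
    omega
  · -- m0 ≥ 3 : both sides strip k = k' + 1 characters
    rw [if_neg (by omega : ¬ m0 - 1 < 2)]
    rw [hhead']
    have hstep := pv_loop_step l (l.headD "") m0 0 h2 hminL hf2 (hminL _ hfirst_mem) le_rfl
    rw [show (0:Int) + 1 = 1 from rfl] at hstep
    set c' := pvCslLoop (l.map g') (g' (l.headD "")) (m0 - 1) 0 with hc'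
    have hc : pvCslLoop l (l.headD "") m0 0 = c' + 1 := by rw [hc1, ← hstep]
    have hc'0 : 0 ≤ c' := pv_loop_ge _ _ _ 0
    have hk : min (pvCslLoop l (l.headD "") m0 0) (m0 - 1) = min c' (m0 - 2) + 1 := by
      rw [hc]; omega
    rw [hk, show m0 - 1 - 1 = m0 - 2 by ring]
    set k' := min c' (m0 - 2) with hkdef
    have hk'0 : 0 ≤ k' := by omega
    have hk'm : k' ≤ m0 - 2 := by omega
    rw [List.map_map]
    refine List.map_congr_left ?_
    intro s hs
    simp only [Function.comp, hg']
    apply String.toList_inj.mp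
    have hlens := h2 s hs
    have hmins := hminL s hs
    rw [pv_take_eq s _ (show 0 ≤ PySem.Str.len s - (k' + 1) by rw [pv_len_eq]; omega)]
    rw [pv_len_init s (by omega),
      show PySem.Str.len s - 1 - k' = PySem.Str.len s - (k' + 1) by ring]
    rw [pv_take_eq _ _ (by rw [pv_len_eq]; omega)]
    rw [PySem.Str.slice_to_neg_one, List.dropLast_eq_take, List.take_take]
    congr 1
    rw [pv_len_eq]
    omega

theorem pv_alt_of_small (l : List String) (s : String) (hs : s ∈ l)
    (hlen : (s.toList.length : Int) < 2) :
    remove_common_postfix_from_string_list_py_alt l = l := by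
  have hne : l ≠ [] := List.ne_nil_of_mem hs
  unfold remove_common_postfix_from_string_list_py_alt
  rw [if_neg hne]
  obtain ⟨m0, hm0⟩ := pv_min_some (l.map PySem.Str.len) (by simpa using hne)
  have hle := PySem.List.min?_isMin hm0 (PySem.Str.len s) (List.mem_map_of_mem hs)
  simp only [hm0, Option.getD_some]
  rw [if_pos (by rw [pv_len_eq] at hle; omega : m0 < 2)]

theorem pv_alt_nostep (l : List String) (hne : l ≠ [])
    (h2 : ∀ s ∈ l, 2 ≤ (s.toList.length : Int))
    (hnot : ¬ PySem.Set.len (PySem.Set.ofList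
        (l.map (fun s => PySem.Str.slice s (some (-1)) none))) = 1) :
    remove_common_postfix_from_string_list_py_alt l = l := by
  have hfirst_mem : l.headD "" ∈ l := by
    rcases l with _ | ⟨x, t⟩
    · exact absurd rfl hne
    · simp
  have hf2 := h2 _ hfirst_mem
  obtain ⟨m0, hm0⟩ := pv_min_some (l.map PySem.Str.len) (by simpa using hne)
  obtain ⟨t0, ht0, ht0e⟩ := List.mem_map.mp (PySem.List.min?_mem hm0)
  have hm2 : 2 ≤ m0 := by rw [← ht0e, pv_len_eq]; exact h2 t0 ht0
  -- the stage-0 check must fail, otherwise all last characters agree and the set has one element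
  have hP0 : ¬ (l.all (fun s =>
      PySem.List.pyGet? s.toList (PySem.Str.len s - 1 - 0) ==
      PySem.List.pyGet? (l.headD "").toList (PySem.Str.len (l.headD "") - 1 - 0))) = true := by
    intro hall
    apply hnot
    have hhead : (l.map (fun s => PySem.Str.slice s (some (-1)) none)).headD "" =
        PySem.Str.slice (l.headD "") (some (-1)) none := by
      rcases l with _ | ⟨x, t⟩
      · exact absurd rfl hne
      · simp
    refine pv_setlen_one_of (by simpa using hne) ?_
    intro y hy
    obtain ⟨s, hs, rfl⟩ := List.mem_map.mp hy
    rw [hhead]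
    have hsne : s.toList ≠ [] := by
      intro h0; have := h2 s hs; rw [h0] at this; simp at this
    have hfne : (l.headD "").toList ≠ [] := by
      intro h0; rw [h0] at hf2; simp at hf2
    refine pv_gl_eq s (l.headD "") hsne hfne ?_
    have he := List.all_eq_true.mp hall s hs
    rw [show PySem.Str.len s - 1 - 0 = (s.toList.length : Int) - 1 by rw [pv_len_eq]; ring,
      show PySem.Str.len (l.headD "") - 1 - 0 = ((l.headD "").toList.length : Int) - 1 by
        rw [pv_len_eq]; ring,
      pv_last' s.toList hsne, pv_last' (l.headD "").toList hfne] at he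
    exact eq_of_beq he
  unfold remove_common_postfix_from_string_list_py_alt
  rw [if_neg hne]
  simp only [hm0, Option.getD_some]
  rw [if_neg (by omega : ¬ m0 < 2)]
  have hc0 : pvCslLoop l (l.headD "") m0 0 = 0 := by
    rw [pvCslLoop, if_pos (by omega : (0:Int) < m0), if_neg hP0]
  rw [hc0, show min (0:Int) (m0 - 1) = 0 by omega]
  have : ∀ s ∈ l, PySem.Str.slice s none (some (PySem.Str.len s - 0)) = s := by
    intro s hs
    apply String.toList_inj.mp
    rw [pv_take_eq s _ (by rw [pv_len_eq]; have := h2 s hs; omega)]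
    rw [pv_len_eq]
    rw [show ((s.toList.length : Int) - 0).toNat = s.toList.length by omega]
    exact List.take_length
  calc l.map (fun s => PySem.Str.slice s none (some (PySem.Str.len s - 0)))
      = l.map id := List.map_congr_left (by simpa using this)
    _ = l := List.map_id l

theorem pv_main (l : List String) :
    remove_common_postfix_from_string_list_py l = remove_common_postfix_from_string_list_py_alt l := by
  fun_induction remove_common_postfix_from_string_list_py l
  case case1 l hany =>
    obtain ⟨s, hs, hcond⟩ := List.any_eq_true.mp hany
    have hlen : (s.toList.length : Int) < 2 := by
      rcases Bool.or_eq_true_iff.mp hcond with h | h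
      · have := of_decide_eq_true h; rwa [pv_len_eq] at this
      · have := of_decide_eq_true h; subst this; simp
    exact (pv_alt_of_small l s hs hlen).symm
  case case2 l hany hset ih =>
    have hset' : PySem.Set.len (PySem.Set.ofList
        (l.map (fun s => PySem.Str.slice s (some (-1)) none))) = 1 := by
      simpa using hset
    have ih' : remove_common_postfix_from_string_list_py
          (l.map (fun s => PySem.Str.slice s none (some (-1)))) =
        remove_common_postfix_from_string_list_py_alt
          (l.map (fun s => PySem.Str.slice s none (some (-1)))) := by
      simpa using ih
    rw [if_pos hset', ih']
    have h2 : ∀ s ∈ l, 2 ≤ (s.toList.length : Int) := by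
      intro s hs
      by_contra hlt
      apply hany
      refine List.any_eq_true.mpr ⟨s, hs, ?_⟩
      rw [decide_eq_true (show PySem.Str.len s < 2 by rw [pv_len_eq]; omega)]
      rfl
    obtain ⟨hne, hall⟩ := pv_setlen_one hset'
    have hne'' : l ≠ [] := by
      intro h0; subst h0; simp at hne
    have hlast : ∀ s ∈ l, s.toList.getLast? = (l.headD "").toList.getLast? := by
      intro s hs
      have hhead : (l.map (fun s => PySem.Str.slice s (some (-1)) none)).headD "" =
          PySem.Str.slice (l.headD "") (some (-1)) none := by
        rcases l with _ | ⟨x, t⟩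
        · exact absurd rfl hne''
        · simp
      have hy := hall _ (List.mem_map_of_mem (f := fun s => PySem.Str.slice s (some (-1)) none) hs)
      rw [hhead] at hy
      have hfirst_mem : l.headD "" ∈ l := by
        rcases l with _ | ⟨x, t⟩
        · exact absurd rfl hne''
        · simp
      have hsne : s.toList ≠ [] := by
        intro h0; have := h2 s hs; rw [h0] at this; simp at this
      have hfne : (l.headD "").toList ≠ [] := by
        intro h0; have := h2 _ hfirst_mem; rw [h0] at this; simp at this
      exact pv_last_of_gl s (l.headD "") hsne hfne hy
    exact (pv_alt_step l hne'' h2 hlast).symm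
  case case3 l hany hset =>
    rcases eq_or_ne l [] with rfl | hne
    · rfl
    · have h2 : ∀ s ∈ l, 2 ≤ (s.toList.length : Int) := by
        intro s hs
        by_contra hlt
        apply hany
        refine List.any_eq_true.mpr ⟨s, hs, ?_⟩
        rw [decide_eq_true (show PySem.Str.len s < 2 by rw [pv_len_eq]; omega)]
        rfl
      have hset' : ¬ PySem.Set.len (PySem.Set.ofList
          (l.map (fun s => PySem.Str.slice s (some (-1)) none))) = 1 := by simpa using hset
      rw [if_neg hset']
      exact (pv_alt_nostep l hne h2 hset').symm

-- ===== VERDICT (by name: the statement is the Claim_ definition above) =====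
theorem remove_common_postfix_from_string_list_py_spec : Claim_equal_remove_common_postfix_from_string_list_py := by
  intro l _
  unfold Spec_remove_common_postfix_from_string_list_py
  exact pv_main l
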